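-- pv_equiv track=rewrite | github.com/SSPAWAR1/PDE-Security | pdesecurity/Exp2.py | gridish_edges
-- ===== SOURCE A (Python) =====
-- import math
-- from typing import Dict, List, Tuple
--
-- def infer_grid_shape(num_qubits: int) -> Tuple[int, int]:
--     """
--     Choose a factorisation as close to square as possible.
--     """
--     best_rows, best_cols = 1, num_qubits
--     best_gap = num_qubits - 1
--     for rows in range(1, int(math.sqrt(num_qubits)) + 1):
--         if num_qubits % rows == 0:
--             cols = num_qubits // rows
--             gap = abs(cols - rows)
--             if gap < best_gap:
--                 best_rows, best_cols = rows, cols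
--                 best_gap = gap
--     return best_rows, best_cols
--
-- def grid_index(r: int, c: int, cols: int) -> int:
--     return r * cols + c
--
-- def gridish_edges(n: int) -> List[Tuple[int, int]]:
--     """
--     Near-square 2D grid topology for n qubits.
--     """
--     rows, cols = infer_grid_shape(n)
--     edges = []
--     for r in range(rows):
--         for c in range(cols - 1):
--             edges.append((grid_index(r, c, cols), grid_index(r, c + 1, cols)))
--     for r in range(rows - 1):
--         for c in range(cols):
--             edges.append((grid_index(r, c, cols), grid_index(r + 1, c, cols)))
--     return edges
-- ===== SOURCE B (Python) =====
-- import math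
-- from typing import List, Tuple
--
-- def _shape_rows(n: int) -> int:
--     # first divisor found scanning down from isqrt(n): the largest divisor <= sqrt(n)
--     for r in range(math.isqrt(n), 0, -1):
--         if n % r == 0:
--             return r
--     return 1
--
-- def gridish_edges(n: int) -> List[Tuple[int, int]]:
--     rows = _shape_rows(n)
--     cols = n // rows
--     horiz = [(i, i + 1) for i in range(n) if i % cols != cols - 1]
--     vert = [(i, i + cols) for i in range(n - cols)]
--     return horiz + vert
-- ===== Notes on version B (the rewrite author's own statement) =====
-- stated objective: alternative
-- what changed: infer_grid_shape's ascending best-gap scan over all rows up to sqrt(n) is replaced by a descending first-divisor search from isqrt(n), and the nested (row, col) double loops building the edges are replaced by single linear-index loops (a filtered scan for horizontal edges and one range for vertical edges), dropping the grid_index helper.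
import Mathlib
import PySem

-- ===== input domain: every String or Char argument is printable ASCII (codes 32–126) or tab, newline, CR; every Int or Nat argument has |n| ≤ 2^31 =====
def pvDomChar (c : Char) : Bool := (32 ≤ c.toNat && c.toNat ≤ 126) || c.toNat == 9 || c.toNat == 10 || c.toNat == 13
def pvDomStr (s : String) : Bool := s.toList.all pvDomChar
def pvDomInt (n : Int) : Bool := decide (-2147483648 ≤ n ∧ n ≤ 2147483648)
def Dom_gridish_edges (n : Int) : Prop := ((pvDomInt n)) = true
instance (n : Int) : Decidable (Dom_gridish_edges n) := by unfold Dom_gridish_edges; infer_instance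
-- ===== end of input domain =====

-- B replaces the best-gap scan of infer_grid_shape by a descending first-divisor search from isqrt(n)
-- and builds the edge list by linear-index loops instead of nested (row, col) loops (alternative decomposition).


-- ===== PORT A =====
-- int(math.sqrt(num_qubits)) is ported as Nat.sqrt: exact for the nonnegative ints of Dom_ (negative n raises → excluded by Pre_).
def infer_grid_shape (n : Int) : Int × Int :=
  let st := (PySem.List.pyRange 1 ((Nat.sqrt n.toNat : Int) + 1) 1).foldl
    (fun (st : Int × Int × Int) rows =>
      if PySem.Int.mod n rows == 0 then
        let cols := PySem.Int.floordiv n rows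
        let gap := |cols - rows|
        if gap < st.2.2 then (rows, cols, gap) else st
      else st)
    (1, n, n - 1)
  (st.1, st.2.1)

def grid_index (r c cols : Int) : Int := r * cols + c

def gridish_edges (n : Int) : List (Int × Int) :=
  let rc := infer_grid_shape n
  let rows := rc.1
  let cols := rc.2
  let e1 := (PySem.List.pyRange 0 rows 1).foldl (fun acc r =>
      (PySem.List.pyRange 0 (cols - 1) 1).foldl (fun acc c =>
        acc ++ [(grid_index r c cols, grid_index r (c + 1) cols)]) acc) []
  (PySem.List.pyRange 0 (rows - 1) 1).foldl (fun acc r =>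
      (PySem.List.pyRange 0 cols 1).foldl (fun acc c =>
        acc ++ [(grid_index r c cols, grid_index (r + 1) c cols)]) acc) e1

-- ===== PORT B =====
-- math.isqrt ported as Nat.sqrt (raises for negative n → excluded by Pre_).
def shape_rows (n : Int) : Int :=
  match (PySem.List.pyRange (Nat.sqrt n.toNat : Int) 0 (-1)).find?
      (fun r => PySem.Int.mod n r == 0) with
  | some r => r
  | none => 1

def gridish_edges_alt (n : Int) : List (Int × Int) :=
  let rows := shape_rows n
  let cols := PySem.Int.floordiv n rows
  let horiz := ((PySem.List.pyRange 0 n 1).filter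
      (fun i => PySem.Int.mod i cols != cols - 1)).map (fun i => (i, i + 1))
  let vert := (PySem.List.pyRange 0 (n - cols) 1).map (fun i => (i, i + cols))
  horiz ++ vert

-- ===== PRECONDITION & SPEC =====
-- Pre_ excludes negative n, where both A (math.sqrt) and B (math.isqrt) raise ValueError.
def Pre_gridish_edges (n : Int) : Prop := 0 ≤ n
instance (n : Int) : Decidable (Pre_gridish_edges n) := by unfold Pre_gridish_edges; infer_instance
def pvWitness_gridish_edges : Int := 12

def Spec_gridish_edges (n : Int) (out : List (Int × Int)) : Prop := out = gridish_edges_alt n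
instance (n : Int) (out : List (Int × Int)) : Decidable (Spec_gridish_edges n out) := by unfold Spec_gridish_edges; infer_instance

-- ===== CLAIM (what is proved, stated in full; the proofs are below) =====
def Claim_equal_gridish_edges : Prop := ∀ (n : Int), Dom_gridish_edges n → Pre_gridish_edges n → Spec_gridish_edges n (gridish_edges n)

-- ===== LEMMAS AND PROOFS =====

-- largest divisor of N in [1, m] (= first divisor scanning m, m-1, …, 1; 1 when the range is empty)
def gdiv (N : Nat) : Nat → Nat
  | 0 => 1
  | m + 1 => if N % (m + 1) = 0 then m + 1 else gdiv N m

theorem gdiv_pos (N m : Nat) : 0 < gdiv N m := by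
  induction m with
  | zero => simp [gdiv]
  | succ m ih => simp only [gdiv]; split <;> omega

theorem gdiv_dvd (N m : Nat) : gdiv N m ∣ N := by
  induction m with
  | zero => simp [gdiv]
  | succ m ih =>
    simp only [gdiv]; split
    · exact Nat.dvd_of_mod_eq_zero ‹_›
    · exact ih

theorem gdiv_le (N m : Nat) (hm : 1 ≤ m) : gdiv N m ≤ m := by
  induction m with
  | zero => omega
  | succ m ih =>
    simp only [gdiv]; split
    · omega
    · rcases Nat.eq_zero_or_pos m with h | h
      · subst h; simp [gdiv]
      · exact le_trans (ih h) (by omega)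

-- B's descending search computes gdiv
theorem find_desc_eq_gdiv (N k : Nat) :
    (match (PySem.List.pyRange (k : Int) 0 (-1)).find?
        (fun r => PySem.Int.mod (N : Int) r == 0) with
     | some r => r
     | none => 1) = (gdiv N k : Int) := by
  induction k with
  | zero =>
    rw [show ((0 : Nat) : Int) = 0 by norm_num, PySem.List.pyRange_neg_one_eq_nil (by norm_num)]
    simp [gdiv]
  | succ k ih =>
    have hcast : ((k + 1 : Nat) : Int) = (k : Int) + 1 := by push_cast; ring
    rw [hcast, PySem.List.pyRange_neg_one_cons (by omega)]
    have h1 : ((k : Int) + 1 - 1) = (k : Int) := by ring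
    rw [h1]
    by_cases h : N % (k + 1) = 0
    · rw [List.find?_cons_of_pos]
      · simp only [gdiv, h, if_pos]
        push_cast; ring
      · rw [show ((k : Int) + 1) = ((k + 1 : Nat) : Int) by push_cast; ring]
        simp only [PySem.Int.mod_natCast, beq_iff_eq, Nat.cast_eq_zero]
        exact h
    · rw [List.find?_cons_of_neg]
      · rw [ih]; simp [gdiv, h]
      · rw [show ((k : Int) + 1) = ((k + 1 : Nat) : Int) by push_cast; ring]
        simp only [PySem.Int.mod_natCast, beq_iff_eq, Nat.cast_eq_zero]
        exact h

-- strict gap decrease between divisors below the square root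
theorem gap_strict (N a b : Nat) (ha : a ∣ N) (hb : b ∣ N) (h0 : 0 < a) (hab : a < b)
    (hbs : b ≤ Nat.sqrt N) :
    ((N / b : Nat) : Int) - (b : Int) < ((N / a : Nat) : Int) - (a : Int) := by
  have hb0 : 0 < b := lt_trans h0 hab
  have hbb : b * b ≤ N := Nat.le_sqrt.mp hbs
  have hbB : b ≤ N / b := (Nat.le_div_iff_mul_le hb0).mpr hbb
  have hA : N / a * a = N := Nat.div_mul_cancel ha
  have hB : N / b * b = N := Nat.div_mul_cancel hb
  have hA' : ((N / a : Nat) : Int) * (a : Int) = (N : Int) := by exact_mod_cast hA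
  have hB' : ((N / b : Nat) : Int) * (b : Int) = (N : Int) := by exact_mod_cast hB
  have h1 : (a : Int) < (b : Int) := by exact_mod_cast hab
  have h2 : (0 : Int) < (a : Int) := by exact_mod_cast h0
  have h3 : (b : Int) ≤ ((N / b : Nat) : Int) := by exact_mod_cast hbB
  have hy : (a : Int) < ((N / b : Nat) : Int) := lt_of_lt_of_le h1 h3
  have key : ((b : Int) - a) * a < ((b : Int) - a) * ((N / b : Nat) : Int) :=
    mul_lt_mul_of_pos_left hy (by linarith)
  nlinarith [hA', hB', key, h2]

-- A's ascending best-gap fold computes gdiv as well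
theorem foldA_eq_gdiv (N m : Nat) (hm : m ≤ Nat.sqrt N) :
    (PySem.List.pyRange 1 ((m : Int) + 1) 1).foldl
      (fun (st : Int × Int × Int) rows =>
        if PySem.Int.mod (N : Int) rows == 0 then
          let cols := PySem.Int.floordiv (N : Int) rows
          let gap := |cols - rows|
          if gap < st.2.2 then (rows, cols, gap) else st
        else st)
      (1, (N : Int), (N : Int) - 1)
    = ((gdiv N m : Int), ((N / gdiv N m : Nat) : Int),
       ((N / gdiv N m : Nat) : Int) - (gdiv N m : Int)) := by
  induction m with
  | zero =>
    rw [show ((0 : Nat) : Int) + 1 = 1 by norm_num, PySem.List.pyRange_one_eq_nil (by norm_num)]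
    simp [gdiv]
  | succ m ih =>
    have hm' : m ≤ Nat.sqrt N := by omega
    have hsq : (m + 1) * (m + 1) ≤ N := Nat.le_sqrt.mp hm
    have hcast : ((m + 1 : Nat) : Int) + 1 = ((m : Int) + 1) + 1 := by push_cast; ring
    rw [hcast, PySem.List.pyRange_one_succ_right (by omega), List.foldl_append, ih hm']
    simp only [List.foldl_cons, List.foldl_nil]
    rw [show ((m : Int) + 1) = ((m + 1 : Nat) : Int) by push_cast; ring]
    by_cases hdvd : N % (m + 1) = 0
    · have hle : (m + 1) ≤ N / (m + 1) := (Nat.le_div_iff_mul_le (by omega)).mpr hsq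
      have habs : |((N / (m + 1) : Nat) : Int) - ((m + 1 : Nat) : Int)|
          = ((N / (m + 1) : Nat) : Int) - ((m + 1 : Nat) : Int) := by
        apply abs_of_nonneg; have : ((m + 1 : Nat) : Int) ≤ ((N / (m + 1) : Nat) : Int) := by
          exact_mod_cast hle
        omega
      rcases Nat.eq_zero_or_pos m with rfl | hmpos
      · simp only [PySem.Int.mod_natCast, PySem.Int.floordiv_natCast, hdvd, habs, gdiv]
        norm_num
      · have hdlt : gdiv N m < m + 1 := by have := gdiv_le N m hmpos; omega
        have hg : gdiv N (m + 1) = m + 1 := by simp [gdiv, hdvd]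
        have hlt' : (N : Int) / ((m : Int) + 1) - ((m : Int) + 1)
            < (N : Int) / ((gdiv N m : Nat) : Int) - ((gdiv N m : Nat) : Int) := by
          have h0 := gap_strict N (gdiv N m) (m + 1) (gdiv_dvd N m)
            (Nat.dvd_of_mod_eq_zero hdvd) (gdiv_pos N m) hdlt hm
          push_cast at h0
          convert h0 using 2
        simp only [PySem.Int.mod_natCast, PySem.Int.floordiv_natCast, hdvd, habs, hg]
        norm_num
        intro hle2
        exfalso
        linarith [hlt']
    · have hg : gdiv N (m + 1) = gdiv N m := by simp [gdiv, hdvd]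
      have hne : ¬ (((N % (m + 1) : Nat) : Int) = 0) := by exact_mod_cast hdvd
      simp only [PySem.Int.mod_natCast, hg]
      rw [if_neg (by simpa using hne)]

-- Nat range decompositions
theorem range_mul_flat (R C : Nat) :
    List.range (R * C) = (List.range R).flatMap (fun r => (List.range C).map (fun c => r * C + c)) := by
  induction R with
  | zero => simp
  | succ R ih =>
    rw [Nat.succ_mul, List.range_add, ih, List.range_succ, List.flatMap_append]
    simp

theorem filtH (R C : Nat) (hC : 0 < C) :
    (List.range (R * C)).filter (fun i => !decide (i % C = C - 1))
      = (List.range R).flatMap (fun r => (List.range (C - 1)).map (fun c => r * C + c)) := by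
  induction R with
  | zero => simp
  | succ R ih =>
    rw [Nat.succ_mul, List.range_add, List.filter_append, ih, List.range_succ,
      List.flatMap_append, List.flatMap_cons, List.flatMap_nil, List.append_nil]
    congr 1
    rw [List.filter_map]
    have hpred : ((fun i => !decide (i % C = C - 1)) ∘ (fun x => R * C + x))
        = fun k => !decide (k % C = C - 1) := by
      funext k
      simp [Function.comp]
    rw [hpred]
    have hsplit : List.range C = List.range (C - 1) ++ [C - 1] := by
      conv_lhs => rw [show C = (C - 1) + 1 by omega]
      rw [List.range_succ]
    rw [hsplit, List.filter_append]
    have h1 : (List.range (C - 1)).filter (fun k => !decide (k % C = C - 1))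
        = List.range (C - 1) := by
      apply List.filter_eq_self.mpr
      intro k hk
      have hk' : k < C - 1 := List.mem_range.mp hk
      have : k % C = k := Nat.mod_eq_of_lt (by omega)
      simp [this]; omega
    have h2 : ([C - 1] : List Nat).filter (fun k => !decide (k % C = C - 1)) = [] := by
      have : (C - 1) % C = C - 1 := Nat.mod_eq_of_lt (by omega)
      simp [this]
    rw [h1, h2]
    simp

-- horizontal edges: B's filtered linear scan = A's nested comprehension (Int level)
theorem hHoriz (R C : Nat) (hC : 0 < C) :
    ((PySem.List.pyRange 0 ((R * C : Nat) : Int) 1).filter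
        (fun i => PySem.Int.mod i (C : Int) != (C : Int) - 1)).map (fun i => (i, i + 1))
      = (PySem.List.pyRange 0 (R : Int) 1).flatMap
          (fun r => (PySem.List.pyRange 0 ((C : Int) - 1) 1).map
            (fun c => (r * (C : Int) + c, r * (C : Int) + (c + 1)))) := by
  have hC1 : ((C : Int) - 1) = ((C - 1 : Nat) : Int) := by omega
  rw [hC1, PySem.List.pyRange_zero_natCast, PySem.List.pyRange_zero_natCast,
    PySem.List.pyRange_zero_natCast]
  rw [List.filter_map]
  have hpred : ((fun i => PySem.Int.mod i (C : Int) != ((C - 1 : Nat) : Int)) ∘ (fun k : Nat => (k : Int)))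
      = fun i : Nat => !decide (i % C = C - 1) := by
    funext i
    simp only [Function.comp, PySem.Int.mod_natCast, bne]
    by_cases hic : i % C = C - 1
    · simp [hic]
    · simp only [hic, decide_false, Bool.not_false]
      simp
      omega
  rw [hpred, filtH R C hC]
  simp only [List.map_map, List.map_flatMap, List.flatMap_map]
  congr 1

-- vertical edges: B's linear scan = A's nested comprehension (Int level)
theorem hVert (R C : Nat) (hR : 0 < R) :
    (PySem.List.pyRange 0 (((R * C : Nat) : Int) - (C : Int)) 1).map (fun i => (i, i + (C : Int)))
      = (PySem.List.pyRange 0 ((R : Int) - 1) 1).flatMap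
          (fun r => (PySem.List.pyRange 0 (C : Int) 1).map
            (fun c => (r * (C : Int) + c, (r + 1) * (C : Int) + c))) := by
  have h1 : (R - 1) * C + C = R * C := by
    have : R - 1 + 1 = R := by omega
    calc (R - 1) * C + C = ((R - 1) + 1) * C := by rw [Nat.succ_mul]
    _ = R * C := by rw [this]
  have h2 : (((R * C : Nat) : Int) - (C : Int)) = (((R - 1) * C : Nat) : Int) := by
    have : ((R * C : Nat) : Int) = (((R - 1) * C : Nat) : Int) + (C : Int) := by
      exact_mod_cast h1.symm
    omega
  have h3 : ((R : Int) - 1) = ((R - 1 : Nat) : Int) := by omega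
  rw [h2, h3, PySem.List.pyRange_zero_natCast, PySem.List.pyRange_zero_natCast,
    PySem.List.pyRange_zero_natCast, range_mul_flat (R - 1) C]
  simp only [List.map_map, List.map_flatMap, List.flatMap_map]
  congr 1
  funext r
  try simp only [List.map_map, Function.comp_apply]
  congr 1
  funext c
  simp only [Function.comp_apply, Prod.mk.injEq]
  exact ⟨by push_cast; ring, by push_cast; ring⟩

-- the assembled positive case
theorem main_pos (N R C : Nat) (hRpos : 0 < R) (hCpos : 0 < C) (hRC : R * C = N)
    (hA : infer_grid_shape (N : Int) = ((R : Int), (C : Int)))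
    (hB : shape_rows (N : Int) = (R : Int)) :
    gridish_edges (N : Int) = gridish_edges_alt (N : Int) := by
  have hdiv : N / R = C := by rw [← hRC]; exact Nat.mul_div_cancel_left C hRpos
  simp only [gridish_edges, gridish_edges_alt, grid_index, hA, hB]
  have hfd : PySem.Int.floordiv (N : Int) (R : Int) = (C : Int) := by
    rw [PySem.Int.floordiv_natCast, hdiv]
  rw [hfd]
  simp only [PySem.List.foldl_append_singleton_eq_map, PySem.List.foldl_append_eq_flatMap]
  rw [show (N : Int) = ((R * C : Nat) : Int) by exact_mod_cast hRC.symm]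
  rw [hHoriz R C hCpos, hVert R C hRpos]
  simp

-- ===== VERDICT (by name: the statement is the Claim_ definition above) =====
theorem gridish_edges_spec : Claim_equal_gridish_edges := by
  intro n _ hpre
  unfold Spec_gridish_edges
  obtain ⟨N, rfl⟩ : ∃ N : Nat, n = (N : Int) := ⟨n.toNat, (Int.toNat_of_nonneg hpre).symm⟩
  by_cases hN0 : N = 0
  · subst hN0
    show gridish_edges ((0 : Nat) : Int) = gridish_edges_alt ((0 : Nat) : Int)
    norm_num
    decide
  · have hRdvd : gdiv N (Nat.sqrt N) ∣ N := gdiv_dvd N (Nat.sqrt N)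
    have hRpos : 0 < gdiv N (Nat.sqrt N) := gdiv_pos N (Nat.sqrt N)
    have hRC : gdiv N (Nat.sqrt N) * (N / gdiv N (Nat.sqrt N)) = N := Nat.mul_div_cancel' hRdvd
    have hCpos : 0 < N / gdiv N (Nat.sqrt N) :=
      Nat.div_pos (Nat.le_of_dvd (Nat.pos_of_ne_zero hN0) hRdvd) hRpos
    have hA : infer_grid_shape (N : Int)
        = ((gdiv N (Nat.sqrt N) : Int), ((N / gdiv N (Nat.sqrt N) : Nat) : Int)) := by
      simp only [infer_grid_shape, Int.toNat_natCast]
      rw [foldA_eq_gdiv N (Nat.sqrt N) le_rfl]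
    have hB : shape_rows (N : Int) = (gdiv N (Nat.sqrt N) : Int) := by
      simp only [shape_rows, Int.toNat_natCast]
      exact find_desc_eq_gdiv N (Nat.sqrt N)
    exact main_pos N (gdiv N (Nat.sqrt N)) (N / gdiv N (Nat.sqrt N)) hRpos hCpos hRC hA hB
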